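-- pv_equiv track=rewrite | github.com/frickerg/python_maze | main.py | remove_loose_ends
-- ===== SOURCE A (Python) =====
-- def remove_loose_ends(actual_path):
--     clean_list = list()
--     for element in actual_path:
--         if element in clean_list:
--             # creates a for loop that deletes the entire sequence that leads back to the same route
--             for indice in [i for i, x in enumerate(clean_list) if x == element]:
--                 # del from indice to len of clean_list
--                 del clean_list[indice : len(clean_list)]
--         clean_list.append(element)
--     return clean_list
-- ===== SOURCE B (Python) =====
-- def remove_loose_ends(actual_path):
--     # Loop erasure via last-occurrence jumps: precompute each element's last
--     # index, then walk the path skipping directly past the last occurrence of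
--     # the current element (the whole loop it closes is never materialised).
--     last = {}
--     for idx, element in enumerate(actual_path):
--         last[element] = idx
--     out = []
--     i = 0
--     while i < len(actual_path):
--         element = actual_path[i]
--         out.append(element)
--         i = last[element] + 1
--     return out
-- ===== Notes on version B (the rewrite author's own statement) =====
-- stated objective: faster
-- what changed: Instead of maintaining a growing clean_list and truncating it on each revisit, B precomputes each element's last index in one pass and then walks the path jumping directly past the last occurrence of the current element, so loops are skipped rather than built and deleted.
import Mathlib
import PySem

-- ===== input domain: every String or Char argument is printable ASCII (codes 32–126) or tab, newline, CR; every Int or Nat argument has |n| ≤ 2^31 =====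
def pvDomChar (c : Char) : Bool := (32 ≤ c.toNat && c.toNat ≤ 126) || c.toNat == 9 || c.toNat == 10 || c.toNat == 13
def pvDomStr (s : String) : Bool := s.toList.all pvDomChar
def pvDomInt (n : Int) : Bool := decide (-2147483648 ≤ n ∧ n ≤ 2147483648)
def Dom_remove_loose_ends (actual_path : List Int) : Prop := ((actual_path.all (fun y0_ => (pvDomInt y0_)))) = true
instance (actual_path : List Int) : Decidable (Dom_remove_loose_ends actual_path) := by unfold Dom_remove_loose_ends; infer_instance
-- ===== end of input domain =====

-- B replaces A's truncate-on-revisit accumulator by a precomputed last-occurrence index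
-- per element and a jump walk that skips each loop entirely (objective: faster).

-- ===== PORT A =====
-- literal transliteration: membership test, then for each index of `element` in clean_list
-- delete the slice from that index to the end (del cl[i:len(cl)] = cl[:i]), then append.
def remove_loose_ends (actual_path : List Int) : List Int :=
  actual_path.foldl (fun clean_list element =>
    (if clean_list.contains element then
      (((PySem.List.enumerate clean_list).filter (fun p => p.2 == element)).map (·.1)).foldl
        (fun cl indice => PySem.List.slice cl none (some indice)) clean_list
     else clean_list) ++ [element]) []

-- ===== PORT B =====
-- first pass: last[element] = idx for each (idx, element) in enumerate(actual_path)
def pvLastDict (p : List Int) : PySem.Dict Int Int :=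
  (PySem.List.enumerate p).foldl (fun d q => d.insert q.2 q.1) PySem.Dict.empty

-- the while loop: i starts at 0, appends path[i] and jumps to last[path[i]] + 1.
-- fuel = path.length makes the recursion structural; i strictly increases each
-- iteration (last[x] ≥ i), so the fuel never runs out while i < length.
-- the `none` branch is unreachable (path[i] is always a key of the dict).
def pvJump (p : List Int) (d : PySem.Dict Int Int) (i : Nat) : Nat → List Int
  | 0 => []
  | fuel + 1 =>
    if h : i < p.length then
      match d.get? p[i] with
      | some j => p[i] :: pvJump p d (j.toNat + 1) fuel
      | none => []
    else []

def remove_loose_ends_alt (actual_path : List Int) : List Int :=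
  pvJump actual_path (pvLastDict actual_path) 0 actual_path.length

-- ===== PRECONDITION & SPEC =====
def Spec_remove_loose_ends (actual_path : List Int) (out : List Int) : Prop := out = remove_loose_ends_alt actual_path
instance (actual_path : List Int) (out : List Int) : Decidable (Spec_remove_loose_ends actual_path out) := by unfold Spec_remove_loose_ends; infer_instance

-- ===== CLAIM (what is proved, stated in full; the proofs are below) =====
def Claim_equal_remove_loose_ends : Prop := ∀ (actual_path : List Int), Dom_remove_loose_ends actual_path → Spec_remove_loose_ends actual_path (remove_loose_ends actual_path)

-- ===== LEMMAS AND PROOFS =====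

-- A's loop body as a named function (definitionally the lambda inside remove_loose_ends)
def pvStepA (clean_list : List Int) (element : Int) : List Int :=
  (if clean_list.contains element then
    (((PySem.List.enumerate clean_list).filter (fun p => p.2 == element)).map (·.1)).foldl
      (fun cl indice => PySem.List.slice cl none (some indice)) clean_list
   else clean_list) ++ [element]

theorem pv_A_unfold (p : List Int) : remove_loose_ends p = p.foldl pvStepA [] := rfl

-- suffix of q strictly after the last occurrence of x (q itself if x ∉ q)
def pvTail (x : Int) (q : List Int) : List Int :=
  (q.reverse.takeWhile (fun e => !(e == x))).reverse

-- common reference: loop erasure by last-occurrence recursion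
def pvLerw : List Int → List Int
  | [] => []
  | x :: q => x :: pvLerw (pvTail x q)
termination_by l => l.length
decreasing_by
  have h := (List.takeWhile_sublist (l := q.reverse) (fun e => !(e == x))).length_le
  simp only [pvTail, List.length_reverse, List.length_cons] at *
  omega

theorem pv_tail_of_not_mem (x : Int) (q : List Int) (h : x ∉ q) : pvTail x q = q := by
  have : q.reverse.takeWhile (fun e => !(e == x)) = q.reverse := by
    apply List.takeWhile_eq_self_iff.mpr
    intro a ha
    simp only [Bool.not_eq_eq_eq_not, Bool.not_true, beq_eq_false_iff_ne, ne_eq]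
    intro hax; exact h (hax ▸ List.mem_reverse.mp ha)
  simp [pvTail, this]

theorem pv_tail_last (x : Int) (w v : List Int) (hv : x ∉ v) :
    pvTail x (w ++ x :: v) = v := by
  have h1 : v.reverse.takeWhile (fun e => !(e == x)) = v.reverse := by
    apply List.takeWhile_eq_self_iff.mpr
    intro a ha
    simp only [Bool.not_eq_eq_eq_not, Bool.not_true, beq_eq_false_iff_ne, ne_eq]
    intro hax; exact hv (hax ▸ List.mem_reverse.mp ha)
  simp [pvTail, List.takeWhile_append, h1]

theorem pv_enum_filter (cl : List Int) (e : Int) (s : Int) (hnd : cl.Nodup) :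
    ((PySem.List.enumerate cl s).filter (fun p => p.2 == e)).map (·.1)
      = match cl.idxOf? e with
        | some n => [s + (n : Int)]
        | none => [] := by
  induction cl generalizing s with
  | nil => simp [PySem.List.enumerate]
  | cons a l ih =>
    rw [PySem.List.enumerate_cons]
    by_cases h : a = e
    · subst h
      have he : a ∉ l := (List.nodup_cons.mp hnd).1
      have hf : (PySem.List.enumerate l (s+1)).filter (fun p => p.2 == a) = [] := by
        rw [List.filter_eq_nil_iff]
        intro p hp
        rw [PySem.List.mem_enumerate_iff] at hp
        obtain ⟨k, hk, rfl⟩ := hp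
        simp only [beq_iff_eq]
        intro hh
        exact he (hh ▸ List.getElem_mem hk)
      simp [hf, List.idxOf?_cons]
    · have hih := ih (s+1) (List.nodup_cons.mp hnd).2
      rcases ho : l.idxOf? e with _ | n <;> rw [ho] at hih <;>
        simp [List.idxOf?_cons, h, hih, ho]
      all_goals omega

theorem pv_not_mem_take (l : List Int) (e : Int) (n : Nat) (h : l.idxOf? e = some n) :
    e ∉ l.take n := by
  obtain ⟨hlt, hgn, hmin⟩ := List.idxOf?_eq_some_iff.mp h
  rw [List.mem_take_iff_getElem]
  rintro ⟨j, hj, hje⟩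
  exact hmin j (lt_of_lt_of_le hj (min_le_left _ _)) hje

-- characterization of A's step on a duplicate-free state
theorem pv_stepA_char (cl : List Int) (e : Int) (hnd : cl.Nodup) :
    pvStepA cl e
      = (match cl.idxOf? e with | some n => cl.take n | none => cl) ++ [e] := by
  rcases ho : cl.idxOf? e with _ | n
  · have he : e ∉ cl := List.idxOf?_eq_none_iff.mp ho
    have hc : cl.contains e = false := by simpa using he
    simp [pvStepA, he]
  · have he : e ∈ cl := by
      obtain ⟨hlt, hgn, _⟩ := List.idxOf?_eq_some_iff.mp ho
      exact hgn ▸ List.getElem_mem hlt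
    have hc : cl.contains e = true := List.elem_eq_true_of_mem he
    rw [pvStepA, if_pos hc, pv_enum_filter cl e 0 hnd, ho]
    simp only [zero_add, List.foldl_cons, List.foldl_nil]
    rw [PySem.List.slice_to_natCast]

theorem pv_stepA_nodup (s : List Int) (e : Int) (h : s.Nodup) : (pvStepA s e).Nodup := by
  rw [pv_stepA_char s e h]
  rcases ho : s.idxOf? e with _ | n
  · have he : e ∉ s := List.idxOf?_eq_none_iff.mp ho
    simp [List.nodup_append, h]
    exact fun a ha hae => he (hae ▸ ha)
  · have hnt := pv_not_mem_take s e n ho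
    have hns : (s.take n).Nodup := h.sublist (List.take_sublist n s)
    simp [List.nodup_append, hns]
    exact fun a ha hae => hnt (hae ▸ ha)

theorem pv_stepA_subset (s : List Int) (e : Int) (h : s.Nodup) :
    ∀ y ∈ pvStepA s e, y ∈ s ∨ y = e := by
  rw [pv_stepA_char s e h]
  rcases ho : s.idxOf? e with _ | n <;> dsimp only <;> intro y hy <;>
    rcases List.mem_append.mp hy with h1 | h1
  · exact Or.inl h1
  · exact Or.inr (List.mem_singleton.mp h1)
  · exact Or.inl (List.mem_of_mem_take h1)
  · exact Or.inr (List.mem_singleton.mp h1)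

-- invariant: processing any u from state x :: s (x ∉ s, nodup) keeps x at the head
theorem pv_foldA_head (x : Int) : ∀ (u s : List Int), x ∉ s → s.Nodup →
    ∃ s', x ∉ s' ∧ s'.Nodup ∧ u.foldl pvStepA (x :: s) = x :: s' := by
  intro u
  induction u with
  | nil => exact fun s hx hs => ⟨s, hx, hs, rfl⟩
  | cons e u ih =>
    intro s hx hs
    have hnd : (x :: s).Nodup := List.nodup_cons.mpr ⟨hx, hs⟩
    rw [List.foldl_cons]
    by_cases hex : e = x
    · subst hex
      have hchar : pvStepA (e :: s) e = e :: ([] : List Int) := by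
        rw [pv_stepA_char _ _ hnd]
        simp [List.idxOf?_cons]
      rw [hchar]
      exact ih [] (List.not_mem_nil) List.nodup_nil
    · rcases ho : s.idxOf? e with _ | n
      · have he : e ∉ s := List.idxOf?_eq_none_iff.mp ho
        have hxe : ¬ x = e := fun h1 => hex h1.symm
        have hchar : pvStepA (x :: s) e = x :: (s ++ [e]) := by
          rw [pv_stepA_char _ _ hnd]
          simp [List.idxOf?_cons, hxe, ho]
        rw [hchar]
        refine ih (s ++ [e]) ?_ ?_
        · simp only [List.mem_append, List.mem_singleton]
          rintro (h1 | h1); exact hx h1; exact hex h1.symm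
        · simp [List.nodup_append, hs]
          exact fun a ha hae => he (hae ▸ ha)
      · have hxe : ¬ x = e := fun h1 => hex h1.symm
        have hchar : pvStepA (x :: s) e = x :: (s.take n ++ [e]) := by
          rw [pv_stepA_char _ _ hnd]
          simp [List.idxOf?_cons, hxe, ho, List.take_succ_cons]
        rw [hchar]
        have hnt := pv_not_mem_take s e n ho
        refine ih (s.take n ++ [e]) ?_ ?_
        · simp only [List.mem_append, List.mem_singleton]
          rintro (h1 | h1)
          · exact hx (List.mem_of_mem_take h1)
          · exact hex h1.symm
        · simp [List.nodup_append, hs.sublist (List.take_sublist n s)]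
          exact fun a ha hae => hnt (hae ▸ ha)

-- if x never recurs, the head x just rides along
theorem pv_foldA_nox (x : Int) : ∀ (q s : List Int), x ∉ q → x ∉ s → s.Nodup →
    q.foldl pvStepA (x :: s) = x :: q.foldl pvStepA s := by
  intro q
  induction q with
  | nil => intro s _ _ _; rfl
  | cons e q ih =>
    intro s hq hx hs
    have hex : e ≠ x := fun h => hq (h ▸ List.mem_cons_self)
    have hqx : x ∉ q := fun h => hq (List.mem_cons_of_mem e h)
    have hnd : (x :: s).Nodup := List.nodup_cons.mpr ⟨hx, hs⟩
    have hstep : pvStepA (x :: s) e = x :: pvStepA s e := by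
      have hxe : ¬ x = e := fun h1 => hex h1.symm
      rw [pv_stepA_char _ _ hnd, pv_stepA_char _ _ hs]
      rcases ho : s.idxOf? e with _ | n <;>
        simp [List.idxOf?_cons, hxe, ho, List.take_succ_cons]
    rw [List.foldl_cons, List.foldl_cons, hstep]
    refine ih (pvStepA s e) hqx ?_ (pv_stepA_nodup s e hs)
    intro hmem
    rcases pv_stepA_subset s e hs x hmem with h1 | h1
    · exact hx h1
    · exact hex h1.symm

theorem pvLerw_cons (x : Int) (q : List Int) :
    pvLerw (x :: q) = x :: pvLerw (pvTail x q) := by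
  rw [pvLerw]

theorem pv_A_eq_lerw : ∀ (n : Nat) (p : List Int), p.length ≤ n →
    p.foldl pvStepA [] = pvLerw p := by
  intro n
  induction n with
  | zero =>
    intro p hp
    have : p = [] := List.eq_nil_of_length_eq_zero (Nat.le_zero.mp hp)
    subst this; simp [pvLerw]
  | succ n ih =>
    intro p hp
    rcases p with _ | ⟨x, q⟩
    · simp [pvLerw]
    · have hq : q.length ≤ n := by simpa using hp
      have hx0 : pvStepA [] x = [x] := by rw [pv_stepA_char _ _ List.nodup_nil]; rfl
      rw [List.foldl_cons, hx0]
      by_cases hxq : x ∈ q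
      · -- split q at the LAST occurrence of x
        obtain ⟨pre, suf, hrev, hnp⟩ : ∃ pre suf,
            q.reverse = pre ++ x :: suf ∧ x ∉ pre := by
          rcases hidx : PySem.List.index? q.reverse x with _ | m
          · exact absurd ((PySem.List.index?_eq_none_iff q.reverse x).mp hidx)
              (by simp [List.mem_reverse, hxq])
          · obtain ⟨pre, suf, h1, _, h3⟩ := (PySem.List.index?_eq_some_iff q.reverse x m).mp hidx
            exact ⟨pre, suf, h1, h3⟩
        have hqeq : q = suf.reverse ++ x :: pre.reverse := by
          have := congrArg List.reverse hrev
          simpa using this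
        have hxv : x ∉ pre.reverse := fun h => hnp (List.mem_reverse.mp h)
        rw [hqeq, List.foldl_append]
        obtain ⟨s', hxs', hnds', heq⟩ := pv_foldA_head x suf.reverse [] List.not_mem_nil List.nodup_nil
        rw [heq, List.foldl_cons]
        have hstepx : pvStepA (x :: s') x = [x] := by
          rw [pv_stepA_char _ _ (List.nodup_cons.mpr ⟨hxs', hnds'⟩)]
          simp [List.idxOf?_cons]
        rw [hstepx, pv_foldA_nox x pre.reverse [] hxv List.not_mem_nil List.nodup_nil]
        have hvlen : pre.reverse.length ≤ n := by
          have h2 := congrArg List.length hqeq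
          simp only [List.length_append, List.length_cons, List.length_reverse] at h2
          simp only [List.length_reverse]
          omega
        rw [ih pre.reverse hvlen, pvLerw_cons,
            pv_tail_last x suf.reverse pre.reverse hxv]
      · rw [pv_foldA_nox x q [] hxq List.not_mem_nil List.nodup_nil, ih q hq,
            pvLerw_cons, pv_tail_of_not_mem x q hxq]

-- ===== B-side =====

theorem pv_lastDict_append (p : List Int) (y : Int) :
    pvLastDict (p ++ [y]) = (pvLastDict p).insert y (p.length : Int) := by
  simp [pvLastDict, PySem.List.enumerate_append, PySem.List.enumerate_cons,
        PySem.List.enumerate_nil, List.foldl_append]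

theorem pv_lastDict_mem (p : List Int) (x : Int) (hx : x ∈ p) :
    ∃ j : Nat, j < p.length ∧ (pvLastDict p).get? x = some (j : Int) ∧
      p[j]? = some x ∧ x ∉ p.drop (j + 1) := by
  induction p using List.reverseRecOn with
  | nil => simp at hx
  | append_singleton p y ih =>
    rw [pv_lastDict_append]
    by_cases hxy : x = y
    · subst hxy
      refine ⟨p.length, by simp, ?_, ?_, ?_⟩
      · rw [PySem.Dict.get?_insert_self]
      · simp
      · simp [List.drop_eq_nil_of_le]
    · have hxp : x ∈ p := by
        rcases List.mem_append.mp hx with h1 | h1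
        · exact h1
        · exact absurd (List.mem_singleton.mp h1) hxy
      obtain ⟨j, hj, hget, hgj, hnd⟩ := ih hxp
      refine ⟨j, by simp; omega, ?_, ?_, ?_⟩
      · rw [PySem.Dict.get?_insert_of_ne _ _ hxy, hget]
      · rw [List.getElem?_append_left hj, hgj]
      · rw [List.drop_append_of_le_length (by omega)]
        simp only [List.mem_append, List.mem_singleton]
        rintro (h1 | h1); exact hnd h1; exact hxy h1

theorem pv_jump_eq (p : List Int) : ∀ (fuel i : Nat), p.length ≤ i + fuel →
    pvJump p (pvLastDict p) i fuel = pvLerw (p.drop i) := by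
  intro fuel
  induction fuel with
  | zero =>
    intro i hi
    rw [List.drop_eq_nil_of_le (by omega)]
    simp [pvJump, pvLerw]
  | succ fuel ih =>
    intro i hi
    by_cases h : i < p.length
    · have hx : p[i] ∈ p := List.getElem_mem h
      obtain ⟨j, hj, hget, hgj, hnd⟩ := pv_lastDict_mem p p[i] hx
      have hij : i ≤ j := by
        by_contra hc
        apply hnd
        have hlt : i - (j + 1) < (p.drop (j + 1)).length := by
          simp only [List.length_drop]; omega
        have hpe : (p.drop (j + 1))[i - (j + 1)]'hlt = p[i] := by
          rw [List.getElem_drop]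
          congr 1; omega
        exact hpe ▸ List.getElem_mem hlt
      rw [pvJump, dif_pos h, hget]
      simp only [Int.toNat_natCast]
      rw [ih (j + 1) (by omega)]
      have hdropi : p.drop i = p[i] :: p.drop (i + 1) := List.drop_eq_getElem_cons h
      rw [hdropi, pvLerw_cons]
      congr 1
      by_cases hji : j = i
      · subst hji
        rw [pv_tail_of_not_mem _ _ hnd]
      · -- j > i : p.drop (i+1) = w ++ p[i] :: p.drop (j+1) with p[i] ∉ the tail
        have hji' : i + 1 ≤ j := by omega
        have hk : j - (i + 1) < (p.drop (i + 1)).length := by simp; omega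
        have hdecomp : p.drop (i + 1)
            = (p.drop (i + 1)).take (j - (i + 1)) ++ p[i] :: p.drop (j + 1) := by
          conv_lhs => rw [← List.take_append_drop (j - (i + 1)) (p.drop (i + 1))]
          congr 1
          rw [List.drop_eq_getElem_cons hk]
          congr 1
          · rw [List.getElem_drop]
            have : p[j] = p[i] := by
              have := hgj
              rw [List.getElem?_eq_getElem hj] at this
              exact Option.some.inj this
            rw [← this]; congr 1; omega
          · rw [List.drop_drop]; congr 1; omega
        rw [hdecomp, pv_tail_last _ _ _ hnd]
    · rw [List.drop_eq_nil_of_le (by omega), pvJump, dif_neg h]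
      simp [pvLerw]

-- ===== VERDICT (by name: the statement is the Claim_ definition above) =====
theorem remove_loose_ends_spec : Claim_equal_remove_loose_ends := by
  intro p _
  unfold Spec_remove_loose_ends
  rw [pv_A_unfold, pv_A_eq_lerw p.length p le_rfl]
  unfold remove_loose_ends_alt
  rw [pv_jump_eq p p.length 0 (by omega), List.drop_zero]
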